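-- pv_equiv track=rewrite | github.com/davide-leva/ripetizioni_python | es_verifica/es_vendite/vendite.py | calcola_premio
-- ===== SOURCE A (Python) =====
-- def calcola_premio(lista_clienti, lista_vendite):
--     """Restituisce una lista_premio"""
--
--     lista_premio = []
--
--     for cliente in lista_clienti:
--         somma_punti = 0
--         for vendita in lista_vendite:
--             if cliente[1] == vendita[0]:
--                 somma_punti += vendita[3]
--         info = [str(cliente[0]), str(cliente[1]), str(somma_punti)]
--         if somma_punti > 80:
--             info.append("Diritto premio")
--         lista_premio.append(info)
--
--     return lista_premio
-- ===== SOURCE B (Python) =====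
-- def calcola_premio(lista_clienti, lista_vendite):
--     """Restituisce una lista_premio"""
--     punti = {}
--     for vendita in lista_vendite:
--         punti[vendita[0]] = punti.get(vendita[0], 0) + vendita[3]
--
--     def riga(cliente):
--         s = punti.get(cliente[1], 0)
--         return ([str(cliente[0]), str(cliente[1]), str(s)]
--                 + (["Diritto premio"] if s > 80 else []))
--
--     return [riga(cliente) for cliente in lista_clienti]
-- ===== Notes on version B (the rewrite author's own statement) =====
-- stated objective: faster
-- what changed: Replaces the per-client inner scan over all sales with a dict of points summed once per sale key, then builds each output row by a comprehension over clients with an O(1) lookup.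
-- outside the precondition, e.g. on calcola_premio([], [[9]]): A returns [], B raises IndexError
import Mathlib
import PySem

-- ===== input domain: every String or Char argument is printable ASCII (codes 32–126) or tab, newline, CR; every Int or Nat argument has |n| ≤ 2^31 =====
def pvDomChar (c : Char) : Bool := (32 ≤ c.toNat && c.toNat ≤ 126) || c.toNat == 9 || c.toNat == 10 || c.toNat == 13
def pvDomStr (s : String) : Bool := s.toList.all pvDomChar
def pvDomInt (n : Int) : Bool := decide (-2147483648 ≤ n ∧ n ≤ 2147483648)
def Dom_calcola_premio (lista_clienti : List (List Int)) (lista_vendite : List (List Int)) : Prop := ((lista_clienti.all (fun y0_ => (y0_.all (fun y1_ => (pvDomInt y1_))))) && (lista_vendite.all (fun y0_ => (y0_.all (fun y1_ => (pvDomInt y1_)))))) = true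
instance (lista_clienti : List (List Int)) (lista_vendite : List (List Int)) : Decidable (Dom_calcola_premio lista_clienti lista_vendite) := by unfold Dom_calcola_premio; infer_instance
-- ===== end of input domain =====

-- B replaces A's per-client scan over all sales by a dict of points summed once per sale key,
-- then maps a row-builder helper over the clients (asymptotically faster).

-- ===== PORT A =====
def calcola_premio (lista_clienti : List (List Int)) (lista_vendite : List (List Int)) : List (List String) :=
  lista_clienti.foldl (fun lista_premio cliente =>
    let somma_punti :=
      lista_vendite.foldl (fun somma_punti vendita =>
        if PySem.List.pyGetD cliente 1 0 = PySem.List.pyGetD vendita 0 0 then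
          somma_punti + PySem.List.pyGetD vendita 3 0
        else somma_punti) 0
    let info := [PySem.Int.toStr (PySem.List.pyGetD cliente 0 0),
                 PySem.Int.toStr (PySem.List.pyGetD cliente 1 0),
                 PySem.Int.toStr somma_punti]
    let info := if somma_punti > 80 then info ++ ["Diritto premio"] else info
    lista_premio ++ [info]) []

-- ===== PORT B =====
-- one step of B's first loop: add a sale's points to the dict entry for its key
def pvAddVendita (punti : PySem.Dict Int Int) (vendita : List Int) : PySem.Dict Int Int :=
  punti.insert (PySem.List.pyGetD vendita 0 0)
    (punti.getD (PySem.List.pyGetD vendita 0 0) 0 + PySem.List.pyGetD vendita 3 0)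

-- B's helper 'riga': the output row for one client, given the points dict
def pvRiga (punti : PySem.Dict Int Int) (cliente : List Int) : List String :=
  let s := punti.getD (PySem.List.pyGetD cliente 1 0) 0
  [PySem.Int.toStr (PySem.List.pyGetD cliente 0 0),
   PySem.Int.toStr (PySem.List.pyGetD cliente 1 0),
   PySem.Int.toStr s]
    ++ (if s > 80 then ["Diritto premio"] else [])

def calcola_premio_alt (lista_clienti : List (List Int)) (lista_vendite : List (List Int)) : List (List String) :=
  lista_clienti.map (pvRiga (lista_vendite.foldl pvAddVendita PySem.Dict.empty))

-- ===== PRECONDITION & SPEC =====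
-- Pre_ excludes inputs with a cliente shorter than 2 or a vendita shorter than 4: there A raises
-- IndexError, or (when lista_clienti is empty) A never reads the malformed vendite while B, which
-- scans every vendita up front, raises IndexError.
def Pre_calcola_premio (lista_clienti : List (List Int)) (lista_vendite : List (List Int)) : Prop :=
  (∀ c ∈ lista_clienti, 2 ≤ c.length) ∧ (∀ v ∈ lista_vendite, 4 ≤ v.length)
instance (lista_clienti : List (List Int)) (lista_vendite : List (List Int)) : Decidable (Pre_calcola_premio lista_clienti lista_vendite) := by unfold Pre_calcola_premio; infer_instance
def pvWitness_calcola_premio : List (List Int) × List (List Int) :=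
  ([[1, 10], [2, 20]], [[10, 0, 0, 50], [10, 0, 0, 40], [20, 0, 0, 7]])
def Spec_calcola_premio (lista_clienti : List (List Int)) (lista_vendite : List (List Int)) (out : List (List String)) : Prop := out = calcola_premio_alt lista_clienti lista_vendite
instance (lista_clienti : List (List Int)) (lista_vendite : List (List Int)) (out : List (List String)) : Decidable (Spec_calcola_premio lista_clienti lista_vendite out) := by unfold Spec_calcola_premio; infer_instance

-- ===== CLAIM (what is proved, stated in full; the proofs are below) =====
def Claim_equal_calcola_premio : Prop := ∀ (lista_clienti : List (List Int)) (lista_vendite : List (List Int)), Dom_calcola_premio lista_clienti lista_vendite → Pre_calcola_premio lista_clienti lista_vendite → Spec_calcola_premio lista_clienti lista_vendite (calcola_premio lista_clienti lista_vendite)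

-- ===== LEMMAS AND PROOFS =====

-- The dict built by B's first loop, looked up at any key k, equals A's inner sum for k.
theorem punti_getD (lista_vendite : List (List Int)) (d : PySem.Dict Int Int) (k : Int) :
    (lista_vendite.foldl pvAddVendita d).getD k 0
    = lista_vendite.foldl (fun somma_punti vendita =>
        if k = PySem.List.pyGetD vendita 0 0 then
          somma_punti + PySem.List.pyGetD vendita 3 0
        else somma_punti) (d.getD k 0) := by
  induction lista_vendite generalizing d with
  | nil => rfl
  | cons v rest ih =>
    simp only [List.foldl_cons, pvAddVendita, ih, PySem.Dict.getD_insert]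
    split_ifs with h
    · simp [h]
    · rfl

theorem calcola_premio_eq_alt (lista_clienti lista_vendite : List (List Int)) :
    calcola_premio lista_clienti lista_vendite = calcola_premio_alt lista_clienti lista_vendite := by
  unfold calcola_premio calcola_premio_alt
  rw [PySem.List.foldl_append_singleton_eq_map]
  simp only [List.nil_append]
  refine List.map_congr_left (fun c _ => ?_)
  rw [pvRiga, punti_getD, PySem.Dict.getD_empty]
  split_ifs <;> simp

-- ===== VERDICT (by name: the statement is the Claim_ definition above) =====
theorem calcola_premio_spec : Claim_equal_calcola_premio := by
  intro lc lv _ _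
  exact calcola_premio_eq_alt lc lv
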